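-- pv_equiv track=rewrite | github.com/estebandonis/Proyecto1-TeoriaDeLaComputacion | dfa_minimization.py | merge_equivalent_pairs
-- ===== SOURCE A (Python) =====
-- def merge_equivalent_pairs(equivalent_pairs):
--     merged_states = []
--
--     for pair in equivalent_pairs:
--         merged = False
--         for i, merged_state in enumerate(merged_states):
--             # Check if the pair intersects with the merged state
--             if any(state in pair for state in merged_state):
--                 # Merge the pair into the existing merged state
--                 merged_states[i] = merged_state.union(set(pair))
--                 merged = True
--                 break
--
--         if not merged:
--             # If the pair didn't intersect with any existing merged states, add it as a new merged state
--             merged_states.append(set(pair))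
--
--     return [''.join(sorted(list(merged_state))) for merged_state in merged_states]
-- ===== SOURCE B (Python) =====
-- def merge_equivalent_pairs(equivalent_pairs):
--     groups = []           # list of sets, in creation order
--     first_idx = {}        # element -> smallest index of a group containing it
--     for pair in equivalent_pairs:
--         hits = [first_idx[s] for s in pair if s in first_idx]
--         if hits:
--             t = min(hits)
--             groups[t] |= set(pair)
--         else:
--             t = len(groups)
--             groups.append(set(pair))
--         for s in pair:
--             first_idx[s] = t
--     return [''.join(sorted(g)) for g in groups]
-- ===== Notes on version B (the rewrite author's own statement) =====
-- stated objective: faster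
-- what changed: B replaces A's per-pair rescan of all accumulated groups (with an inner membership scan per group) by a dict mapping each element to the smallest index of a group containing it, so each pair's target group is found by O(pair) dict lookups instead of scanning every group.
import Mathlib
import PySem

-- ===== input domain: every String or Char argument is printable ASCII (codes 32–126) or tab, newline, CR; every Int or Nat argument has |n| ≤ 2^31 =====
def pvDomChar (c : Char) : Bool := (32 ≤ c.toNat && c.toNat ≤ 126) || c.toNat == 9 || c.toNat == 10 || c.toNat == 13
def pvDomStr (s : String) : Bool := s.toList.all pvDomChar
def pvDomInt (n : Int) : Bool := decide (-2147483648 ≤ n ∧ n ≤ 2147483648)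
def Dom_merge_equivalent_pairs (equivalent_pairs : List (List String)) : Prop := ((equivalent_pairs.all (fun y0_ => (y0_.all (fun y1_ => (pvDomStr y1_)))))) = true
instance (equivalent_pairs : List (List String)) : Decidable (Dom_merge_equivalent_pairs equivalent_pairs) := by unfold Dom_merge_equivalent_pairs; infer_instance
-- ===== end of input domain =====

-- B replaces A's rescan of all accumulated groups per pair by a dict element → smallest containing
-- group index, so each pair's target group is found by per-element lookups instead of a full scan.

-- ===== PORT A =====
-- inner 'for i, merged_state in enumerate(merged_states): … break': returns the updated list on
-- the first intersecting group, none if no group intersects (then A appends a new group).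
def mepInner (pair : List String) : List (PySem.Set String) → Option (List (PySem.Set String))
  | [] => none
  | g :: rest =>
    if g.any (fun state => pair.contains state) then
      some (PySem.Set.union g (PySem.Set.ofList pair) :: rest)
    else
      (mepInner pair rest).map (g :: ·)

def merge_equivalent_pairs (equivalent_pairs : List (List String)) : List String :=
  let merged_states :=
    equivalent_pairs.foldl
      (fun ms pair =>
        match mepInner pair ms with
        | some ms' => ms'                                    -- merged = True, break
        | none => ms ++ [PySem.Set.ofList pair])             -- append new merged state
      []
  merged_states.map (fun g => PySem.Str.join "" (PySem.List.sorted g (fun x => x) false))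

-- ===== PORT B =====
-- one step of Source B's loop; the state is (groups, first_idx)
def mepAltStep (st : List (PySem.Set String) × PySem.Dict String Nat) (pair : List String) :
    List (PySem.Set String) × PySem.Dict String Nat :=
  let groups := st.1
  let idx := st.2
  let hits := pair.filterMap (fun s => idx.get? s)
  match hits.min? with
  | some t =>
      (groups.set t (PySem.Set.union (groups.getD t []) (PySem.Set.ofList pair)),
       pair.foldl (fun d s => d.insert s t) idx)
  | none =>
      (groups ++ [PySem.Set.ofList pair],
       pair.foldl (fun d s => d.insert s groups.length) idx)

def merge_equivalent_pairs_alt (equivalent_pairs : List (List String)) : List String :=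
  let st := equivalent_pairs.foldl mepAltStep ([], PySem.Dict.empty)
  st.1.map (fun g => PySem.Str.join "" (PySem.List.sorted g (fun x => x) false))

-- ===== PRECONDITION & SPEC =====
def Spec_merge_equivalent_pairs (equivalent_pairs : List (List String)) (out : List String) : Prop := out = merge_equivalent_pairs_alt equivalent_pairs
instance (equivalent_pairs : List (List String)) (out : List String) : Decidable (Spec_merge_equivalent_pairs equivalent_pairs out) := by unfold Spec_merge_equivalent_pairs; infer_instance

-- ===== CLAIM (what is proved, stated in full; the proofs are below) =====
def Claim_equal_merge_equivalent_pairs : Prop := ∀ (equivalent_pairs : List (List String)), Dom_merge_equivalent_pairs equivalent_pairs → Spec_merge_equivalent_pairs equivalent_pairs (merge_equivalent_pairs equivalent_pairs)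

-- ===== LEMMAS AND PROOFS =====

-- smallest index of a group containing s (the value first_idx caches for s)
def firstIdx (s : String) : List (PySem.Set String) → Option Nat
  | [] => none
  | g :: rest => if s ∈ g then some 0 else (firstIdx s rest).map (· + 1)

-- the dict invariant: first_idx is exactly firstIdx over the current groups
def MepInv (ms : List (PySem.Set String)) (idx : PySem.Dict String Nat) : Prop :=
  ∀ s, idx.get? s = firstIdx s ms

theorem min?_map_succ (l : List Nat) : (l.map (· + 1)).min? = l.min?.map (· + 1) := by
  induction l with
  | nil => simp
  | cons x xs ih =>
    cases hx : xs.min? <;>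
      simp [List.min?_cons, hx, ih, Nat.min_def] <;> split_ifs <;> omega

theorem firstIdx_eq_some_iff (s : String) (ms : List (PySem.Set String)) (v : Nat) :
    firstIdx s ms = some v ↔
      v < ms.length ∧ s ∈ ms.getD v [] ∧ ∀ j < v, s ∉ ms.getD j [] := by
  induction ms generalizing v with
  | nil => simp [firstIdx]
  | cons g rest ih =>
    by_cases hg : s ∈ g
    · simp only [firstIdx, if_pos hg]
      constructor
      · rintro h
        cases h
        simp [hg]
      · rintro ⟨_, _, hmin⟩
        cases v with
        | zero => rfl
        | succ w => exact absurd hg (hmin 0 (Nat.succ_pos w))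
    · simp only [firstIdx, if_neg hg, Option.map_eq_some_iff]
      constructor
      · rintro ⟨w, hw, rfl⟩
        obtain ⟨hlt, hmem, hmin⟩ := (ih w).mp hw
        refine ⟨by simpa using hlt, by simpa using hmem, ?_⟩
        intro j hj
        cases j with
        | zero => simpa using hg
        | succ k => simpa using hmin k (by omega)
      · rintro ⟨hlt, hmem, hmin⟩
        cases v with
        | zero => exact absurd (by simpa using hmem) hg
        | succ w =>
          refine ⟨w, (ih w).mpr ⟨by simpa using hlt, by simpa using hmem, ?_⟩, rfl⟩
          intro j hj
          simpa using hmin (j + 1) (by omega)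

theorem firstIdx_eq_none_iff (s : String) (ms : List (PySem.Set String)) :
    firstIdx s ms = none ↔ ∀ g ∈ ms, s ∉ g := by
  induction ms with
  | nil => simp [firstIdx]
  | cons g rest ih =>
    by_cases hg : s ∈ g
    · simp [firstIdx, hg]
    · simp [firstIdx, hg, ih]

theorem firstIdx_lt_length {s : String} {ms : List (PySem.Set String)} {v : Nat}
    (h : firstIdx s ms = some v) : v < ms.length :=
  ((firstIdx_eq_some_iff s ms v).mp h).1

theorem mepInner_eq_none (pair : List String) (ms : List (PySem.Set String))
    (h : (pair.filterMap (fun s => firstIdx s ms)).min? = none) :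
    mepInner pair ms = none := by
  induction ms with
  | nil => simp [mepInner]
  | cons g rest ih =>
    simp only [List.min?_eq_none_iff, List.filterMap_eq_nil_iff] at h
    have hng : ∀ s ∈ pair, s ∉ g := by
      intro s hs hsg
      have := h s hs
      simp [firstIdx, hsg] at this
    have hcond : g.any (fun state => pair.contains state) = false := by
      simp only [List.any_eq_false]
      intro st hst
      simp only [List.contains_eq_mem, Bool.not_eq_true, decide_eq_false_iff_not]
      exact fun hp => hng st hp hst
    have hgp : ∀ x ∈ g, x ∉ pair := fun x hx hp => hng x hp hx
    have hrest : (pair.filterMap (fun s => firstIdx s rest)).min? = none := by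
      simp only [List.min?_eq_none_iff, List.filterMap_eq_nil_iff]
      intro s hs
      have := h s hs
      simp only [firstIdx, if_neg (hng s hs), Option.map_eq_none_iff] at this
      exact this
    simp only [mepInner]
    rw [if_neg (by simp only [List.any_eq_true]; push Not; intro x hx; simpa [List.contains_eq_mem] using hgp x hx), ih hrest]
    rfl

theorem mepInner_eq_some (pair : List String) (ms : List (PySem.Set String)) (t : Nat)
    (h : (pair.filterMap (fun s => firstIdx s ms)).min? = some t) :
    mepInner pair ms = some (ms.set t (PySem.Set.union (ms.getD t []) (PySem.Set.ofList pair))) := by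
  induction ms generalizing t with
  | nil => simp [List.filterMap_eq_nil_iff.mpr (fun s _ => rfl : ∀ s ∈ pair, firstIdx s [] = none)] at h
  | cons g rest ih =>
    by_cases hg : ∃ s ∈ pair, s ∈ g
    · obtain ⟨s0, hs0p, hs0g⟩ := hg
      have h0 : (0 : Nat) ∈ pair.filterMap (fun s => firstIdx s (g :: rest)) := by
        exact List.mem_filterMap.mpr ⟨s0, hs0p, by simp [firstIdx, hs0g]⟩
      obtain ⟨-, hle⟩ := List.min?_eq_some_iff_subtype.mp h
      have ht0 : t = 0 := Nat.le_zero.mp (hle 0 h0)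
      have hcond : g.any (fun state => pair.contains state) = true := by
        simp only [List.any_eq_true]
        exact ⟨s0, hs0g, by simpa [List.contains_eq_mem] using hs0p⟩
      subst ht0
      simp only [mepInner, hcond, if_true, List.set_cons_zero, List.getD_cons_zero]
    · push Not at hg
      have hcond : g.any (fun state => pair.contains state) = false := by
        simp only [List.any_eq_false]
        intro st hst
        simp only [List.contains_eq_mem, Bool.not_eq_true, decide_eq_false_iff_not]
        exact fun hp => hg st hp hst
      have hgp : ∀ x ∈ g, x ∉ pair := fun x hx hp => hg x hp hx
      have hmap : pair.filterMap (fun s => firstIdx s (g :: rest))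
          = (pair.filterMap (fun s => firstIdx s rest)).map (· + 1) := by
        rw [List.map_filterMap]
        refine List.filterMap_congr ?_
        intro s hs
        simp [firstIdx, hg s hs]
      rw [hmap, min?_map_succ] at h
      cases hr : (pair.filterMap (fun s => firstIdx s rest)).min? with
      | none => rw [hr] at h; simp at h
      | some v =>
        rw [hr] at h
        simp only [Option.map_some, Option.some.injEq] at h
        subst h
        simp only [mepInner]
        rw [if_neg (by simp only [List.any_eq_true]; push Not; intro x hx; simpa [List.contains_eq_mem] using hgp x hx), ih v hr]
        simp

-- lookup after Source B's 'for s in pair: first_idx[s] = t'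
theorem get?_foldl_insert_const (pair : List String) (idx : PySem.Dict String Nat) (t : Nat)
    (s : String) :
    (pair.foldl (fun d x => d.insert x t) idx).get? s
      = if s ∈ pair then some t else idx.get? s := by
  induction pair generalizing idx with
  | nil => simp
  | cons p ps ih =>
    simp only [List.foldl_cons, ih]
    by_cases hs : s ∈ ps
    · simp [hs]
    · by_cases hp : s = p
      · subst hp; simp [hs, PySem.Dict.get?_insert_self]
      · simp [hs, hp, PySem.Dict.get?_insert_of_ne _ _ hp]

theorem firstIdx_append_singleton (s : String) (ms : List (PySem.Set String))
    (g : PySem.Set String) :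
    firstIdx s (ms ++ [g]) =
      match firstIdx s ms with
      | some v => some v
      | none => if s ∈ g then some ms.length else none := by
  induction ms with
  | nil => simp [firstIdx]
  | cons g0 rest ih =>
    by_cases h0 : s ∈ g0
    · simp [firstIdx, h0]
    · simp only [List.cons_append, firstIdx, if_neg h0, ih]
      cases firstIdx s rest <;> by_cases hg : s ∈ g <;> simp [hg, List.length_cons]

theorem firstIdx_set_congr (s : String) (ms : List (PySem.Set String)) (t : Nat)
    (g' : PySem.Set String) (hc : s ∈ g' ↔ s ∈ ms.getD t []) :
    firstIdx s (ms.set t g') = firstIdx s ms := by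
  induction ms generalizing t with
  | nil => simp
  | cons g0 rest ih =>
    cases t with
    | zero =>
      simp only [List.getD_cons_zero] at hc
      by_cases h0 : s ∈ g0
      · simp [firstIdx, h0, hc.mpr h0]
      · have hng' : s ∉ g' := fun h => h0 (hc.mp h)
        simp [firstIdx, h0, hng']
    | succ k =>
      simp only [List.getD_cons_succ] at hc
      by_cases h0 : s ∈ g0 <;> simp [firstIdx, h0, ih k hc]

-- the A-side fold step, named so both fold lemmas mention the same function
theorem step_agree (pair : List String) (ms : List (PySem.Set String))
    (idx : PySem.Dict String Nat) (hinv : MepInv ms idx) :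
    (mepAltStep (ms, idx) pair).1
        = (match mepInner pair ms with
           | some ms' => ms'
           | none => ms ++ [PySem.Set.ofList pair])
      ∧ MepInv (mepAltStep (ms, idx) pair).1 (mepAltStep (ms, idx) pair).2 := by
  have hhits : pair.filterMap (fun s => idx.get? s)
      = pair.filterMap (fun s => firstIdx s ms) :=
    List.filterMap_congr (fun s _ => hinv s)
  cases hmin : (pair.filterMap (fun s => firstIdx s ms)).min? with
  | none =>
    have hA := mepInner_eq_none pair ms hmin
    have hnone : ∀ s ∈ pair, firstIdx s ms = none := by
      simp only [List.min?_eq_none_iff, List.filterMap_eq_nil_iff] at hmin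
      exact hmin
    constructor
    · simp [mepAltStep, hhits, hmin, hA]
    · intro s
      simp only [mepAltStep, hhits, hmin]
      rw [get?_foldl_insert_const, firstIdx_append_singleton]
      by_cases hs : s ∈ pair
      · simp [hs, hnone s hs, (PySem.Set.mem_ofList pair s).mpr hs]
      · simp only [if_neg hs, hinv s]
        cases hfi : firstIdx s ms with
        | some v => rfl
        | none =>
          have : s ∉ PySem.Set.ofList pair := fun h => hs ((PySem.Set.mem_ofList pair s).mp h)
          simp [this]
  | some t =>
    have hA := mepInner_eq_some pair ms t hmin
    obtain ⟨htmem, hle⟩ := List.min?_eq_some_iff_subtype.mp hmin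
    obtain ⟨s1, hs1p, hs1⟩ := List.mem_filterMap.mp htmem
    have htlt : t < ms.length := firstIdx_lt_length hs1
    have hge : ∀ s ∈ pair, ∀ v, firstIdx s ms = some v → t ≤ v := by
      intro s hs v hv
      exact hle v (List.mem_filterMap.mpr ⟨s, hs, hv⟩)
    constructor
    · simp [mepAltStep, hhits, hmin, hA]
    · intro s
      simp only [mepAltStep, hhits, hmin]
      rw [get?_foldl_insert_const]
      by_cases hs : s ∈ pair
      · -- s now lives in group t, and in no earlier group
        rw [if_pos hs]
        symm
        rw [firstIdx_eq_some_iff]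
        refine ⟨by simp only [List.length_set]; exact htlt, ?_, ?_⟩
        · rw [List.getD_eq_getElem?_getD, List.getElem?_set_self (by simpa using htlt)]
          exact (PySem.Set.mem_union _ _ s).mpr (Or.inr ((PySem.Set.mem_ofList pair s).mpr hs))
        · intro j hj
          rw [List.getD_eq_getElem?_getD, List.getElem?_set_ne (by omega)]
          rw [← List.getD_eq_getElem?_getD]
          intro hmem
          have hjlt : j < ms.length := by omega
          cases hfi : firstIdx s ms with
          | none =>
            exact (firstIdx_eq_none_iff s ms).mp hfi (ms.getD j [])
              (by rw [List.getD_eq_getElem ms [] hjlt]; exact List.getElem_mem hjlt) hmem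
          | some v =>
            have := ((firstIdx_eq_some_iff s ms v).mp hfi).2.2 j
              (by have := hge s hs v hfi; omega)
            exact this hmem
      · rw [if_neg hs, hinv s]
        have hnp : s ∉ PySem.Set.ofList pair := fun h => hs ((PySem.Set.mem_ofList pair s).mp h)
        refine (firstIdx_set_congr s ms t _ ?_).symm
        constructor
        · intro h
          rcases (PySem.Set.mem_union _ _ s).mp h with h' | h'
          · exact h'
          · exact absurd h' hnp
        · intro h
          exact (PySem.Set.mem_union _ _ s).mpr (Or.inl h)

theorem fold_agree (eps : List (List String)) (ms : List (PySem.Set String))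
    (idx : PySem.Dict String Nat) (hinv : MepInv ms idx) :
    eps.foldl
        (fun ms pair =>
          match mepInner pair ms with
          | some ms' => ms'
          | none => ms ++ [PySem.Set.ofList pair]) ms
      = (eps.foldl mepAltStep (ms, idx)).1 := by
  induction eps generalizing ms idx with
  | nil => rfl
  | cons pair rest ih =>
    obtain ⟨hstep, hinv'⟩ := step_agree pair ms idx hinv
    simp only [List.foldl_cons, ← hstep]
    exact ih (mepAltStep (ms, idx) pair).1 (mepAltStep (ms, idx) pair).2 hinv'

-- ===== VERDICT (by name: the statement is the Claim_ definition above) =====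
theorem merge_equivalent_pairs_spec : Claim_equal_merge_equivalent_pairs := by
  intro eps _
  unfold Spec_merge_equivalent_pairs merge_equivalent_pairs merge_equivalent_pairs_alt
  have hinv0 : MepInv [] PySem.Dict.empty := by
    intro s
    simp [firstIdx, PySem.Dict.get?_empty]
  rw [fold_agree eps [] PySem.Dict.empty hinv0]
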